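-- pv_equiv track=rewrite | github.com/1337kiwi/osguard | project-ctf/challenge2/rag.py | bash_detect_output
-- ===== SOURCE A (Python) =====
-- def bash_detect_output(input_text: str, output_text: str):
--     input_text = input_text.strip()
--     output_text = output_text.strip()
--
--     if output_text.lower() in input_text.lower():
--         return False
--
--     output_words = output_text.split(" ")
--     input_words = input_text.split(" ")
--     if len(output_words) >= 2:
--         for i in range(len(output_words) - 1):
--             for j in range(len(input_words) - 1):
--                 if (
--                     output_words[i].lower() in input_words[j].lower()
--                     and output_words[i + 1].lower() in input_words[j + 1].lower()
--                 ):
--                     return False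
--
--     return True
-- ===== SOURCE B (Python) =====
-- def bash_detect_output(input_text: str, output_text: str):
--     input_text = input_text.strip()
--     output_text = output_text.strip()
--
--     if output_text.lower() in input_text.lower():
--         return False
--
--     output_words = output_text.split(" ")
--     input_words = input_text.split(" ")
--     # containment table: all (i, j) with output_words[i] a substring of input_words[j]
--     pairs = {
--         (i, j)
--         for i, ow in enumerate(output_words)
--         for j, iw in enumerate(input_words)
--         if ow.lower() in iw.lower()
--     }
--     # echo iff two adjacent output words match two adjacent input words
--     return not any((i + 1, j + 1) in pairs for (i, j) in pairs)
-- ===== Notes on version B (the rewrite author's own statement) =====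
-- stated objective: alternative
-- what changed: The fused double loop with early return is split into two passes: first a set of all containment pairs (i,j) is built, then a separate diagonal-adjacency scan over that set decides the result.
import Mathlib
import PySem

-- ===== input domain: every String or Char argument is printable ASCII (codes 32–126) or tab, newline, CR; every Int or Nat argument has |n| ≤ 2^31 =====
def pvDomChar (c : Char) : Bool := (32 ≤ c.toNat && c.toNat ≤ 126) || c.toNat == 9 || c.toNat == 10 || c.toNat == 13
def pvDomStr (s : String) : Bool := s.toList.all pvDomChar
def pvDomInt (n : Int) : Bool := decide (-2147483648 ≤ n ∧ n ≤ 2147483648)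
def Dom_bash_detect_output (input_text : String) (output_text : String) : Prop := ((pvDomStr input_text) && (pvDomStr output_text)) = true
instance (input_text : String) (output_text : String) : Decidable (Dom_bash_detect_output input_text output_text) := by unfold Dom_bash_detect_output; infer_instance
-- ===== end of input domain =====

-- B replaces A's fused early-return double loop by two passes: build the set of all
-- containment pairs (i, j), then scan it for a diagonally adjacent pair. Same cost; alternative decomposition.

-- ===== PORT A =====
def bash_detect_output (input_text : String) (output_text : String) : Bool :=
  let it := PySem.Str.strip input_text
  let ot := PySem.Str.strip output_text
  if PySem.Str.isIn (PySem.Str.lower ot) (PySem.Str.lower it) then false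
  else
    let ow := (PySem.Str.split? ot " ").getD []   -- sep ≠ "", split? is always some
    let iw := (PySem.Str.split? it " ").getD []
    if 2 ≤ ow.length then
      -- the nested for-loops with early 'return False': a search over both index ranges
      if (PySem.List.pyRange 0 ((ow.length : Int) - 1) 1).any (fun i =>
           (PySem.List.pyRange 0 ((iw.length : Int) - 1) 1).any (fun j =>
             PySem.Str.isIn (PySem.Str.lower (PySem.List.pyGetD ow i ""))
                            (PySem.Str.lower (PySem.List.pyGetD iw j ""))
             && PySem.Str.isIn (PySem.Str.lower (PySem.List.pyGetD ow (i + 1) ""))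
                               (PySem.Str.lower (PySem.List.pyGetD iw (j + 1) ""))))
      then false else true
    else true

-- ===== PORT B =====
def bash_detect_output_alt (input_text : String) (output_text : String) : Bool :=
  let it := PySem.Str.strip input_text
  let ot := PySem.Str.strip output_text
  if PySem.Str.isIn (PySem.Str.lower ot) (PySem.Str.lower it) then false
  else
    let ow := (PySem.Str.split? ot " ").getD []
    let iw := (PySem.Str.split? it " ").getD []
    let pairs : PySem.Set (Int × Int) := PySem.Set.ofList
      ((PySem.List.enumerate ow).flatMap (fun p =>
        ((PySem.List.enumerate iw).filter (fun q =>
          PySem.Str.isIn (PySem.Str.lower p.2) (PySem.Str.lower q.2))).map (fun q => (p.1, q.1))))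
    !(pairs.any (fun p => PySem.Set.contains pairs (p.1 + 1, p.2 + 1)))

-- ===== PRECONDITION & SPEC =====
def Spec_bash_detect_output (input_text : String) (output_text : String) (out : Bool) : Prop := out = bash_detect_output_alt input_text output_text
instance (input_text : String) (output_text : String) (out : Bool) : Decidable (Spec_bash_detect_output input_text output_text out) := by unfold Spec_bash_detect_output; infer_instance

-- ===== CLAIM (what is proved, stated in full; the proofs are below) =====
def Claim_equal_bash_detect_output : Prop := ∀ (input_text : String) (output_text : String), Dom_bash_detect_output input_text output_text → Spec_bash_detect_output input_text output_text (bash_detect_output input_text output_text)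

-- ===== LEMMAS AND PROOFS =====

lemma mem_pairs_iff (ow iw : List String) (a b : Int) :
    (a, b) ∈ ((PySem.List.enumerate ow).flatMap (fun p =>
        ((PySem.List.enumerate iw).filter (fun q =>
          PySem.Str.isIn (PySem.Str.lower p.2) (PySem.Str.lower q.2))).map (fun q => (p.1, q.1)))) ↔
    ∃ (i : Nat) (hi : i < ow.length) (j : Nat) (hj : j < iw.length),
      a = i ∧ b = j ∧
      PySem.Str.isIn (PySem.Str.lower ow[i]) (PySem.Str.lower iw[j]) = true := by
  simp only [List.mem_flatMap, List.mem_map, List.mem_filter, PySem.List.mem_enumerate_iff]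
  constructor
  · rintro ⟨p, ⟨i, hi, rfl⟩, q, ⟨⟨j, hj, rfl⟩, hc⟩, heq⟩
    exact ⟨i, hi, j, hj, by simpa using congrArg Prod.fst heq.symm,
           by simpa using congrArg Prod.snd heq.symm, hc⟩
  · rintro ⟨i, hi, j, hj, rfl, rfl, hc⟩
    exact ⟨(i, ow[i]), ⟨i, hi, by simp⟩, ⟨(j, iw[j]), ⟨⟨j, hj, by simp⟩, hc⟩, by simp⟩⟩

lemma search_eq (ow iw : List String) :
    (decide (2 ≤ ow.length) &&
     (PySem.List.pyRange 0 ((ow.length : Int) - 1) 1).any (fun i =>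
           (PySem.List.pyRange 0 ((iw.length : Int) - 1) 1).any (fun j =>
             PySem.Str.isIn (PySem.Str.lower (PySem.List.pyGetD ow i ""))
                            (PySem.Str.lower (PySem.List.pyGetD iw j ""))
             && PySem.Str.isIn (PySem.Str.lower (PySem.List.pyGetD ow (i + 1) ""))
                               (PySem.Str.lower (PySem.List.pyGetD iw (j + 1) ""))))) =
    (PySem.Set.ofList
      ((PySem.List.enumerate ow).flatMap (fun p =>
        ((PySem.List.enumerate iw).filter (fun q =>
          PySem.Str.isIn (PySem.Str.lower p.2) (PySem.Str.lower q.2))).map (fun q => (p.1, q.1))))).any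
      (fun p => PySem.Set.contains (PySem.Set.ofList
        ((PySem.List.enumerate ow).flatMap (fun p =>
          ((PySem.List.enumerate iw).filter (fun q =>
            PySem.Str.isIn (PySem.Str.lower p.2) (PySem.Str.lower q.2))).map (fun q => (p.1, q.1)))))
        (p.1 + 1, p.2 + 1)) := by
  rw [Bool.eq_iff_iff]
  simp only [Bool.and_eq_true, decide_eq_true_eq, List.any_eq_true,
    PySem.List.mem_pyRange_one, PySem.Set.contains_iff, PySem.Set.mem_ofList]
  constructor
  · rintro ⟨hm, i, ⟨hi0, hi1⟩, j, ⟨hj0, hj1⟩, hc⟩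
    obtain ⟨hc1, hc2⟩ := hc
    rw [PySem.List.pyGetD_eq_getElem ow "" hi0 (by omega),
        PySem.List.pyGetD_eq_getElem iw "" hj0 (by omega)] at hc1
    rw [PySem.List.pyGetD_eq_getElem ow "" (by omega) (by omega),
        PySem.List.pyGetD_eq_getElem iw "" (by omega) (by omega)] at hc2
    refine ⟨(i, j), ?_, ?_⟩
    · rw [mem_pairs_iff]
      exact ⟨i.toNat, by omega, j.toNat, by omega, by omega, by omega, hc1⟩
    · rw [mem_pairs_iff]
      refine ⟨(i + 1).toNat, by omega, (j + 1).toNat, by omega, by omega, by omega, ?_⟩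
      convert hc2 using 4
  · rintro ⟨⟨a, b⟩, h1, h2⟩
    rw [mem_pairs_iff] at h1 h2
    obtain ⟨i, hi, j, hj, rfl, rfl, hc1⟩ := h1
    obtain ⟨i', hi', j', hj', he1, he2, hc2⟩ := h2
    have hii : i' = i + 1 := by omega
    have hjj : j' = j + 1 := by omega
    subst hii hjj
    refine ⟨by omega, (i : Int), ⟨by omega, by omega⟩,
            (j : Int), ⟨by omega, by omega⟩, ?_, ?_⟩
    · rw [PySem.List.pyGetD_eq_getElem ow "" (by omega) (by omega),
          PySem.List.pyGetD_eq_getElem iw "" (by omega) (by omega)]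
      convert hc1 using 4
    · rw [PySem.List.pyGetD_eq_getElem ow "" (by omega) (by omega),
          PySem.List.pyGetD_eq_getElem iw "" (by omega) (by omega)]
      convert hc2 using 4

lemma if_reduce (c : Prop) [Decidable c] (b : Bool) :
    (if c then (if b then false else true) else true) = !(decide c && b) := by
  split_ifs <;> simp_all

-- ===== VERDICT (by name: the statement is the Claim_ definition above) =====
theorem bash_detect_output_spec : Claim_equal_bash_detect_output := by
  intro input_text output_text _
  unfold Spec_bash_detect_output bash_detect_output bash_detect_output_alt
  simp only []
  split
  · rfl
  · rw [if_reduce, search_eq]
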